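-- pv_equiv track=rewrite | github.com/Lucas-Henrique-Lopes-Costa/ia-humano | Aula 3/Solução 1/cinema_seats.py | encontrar_melhor_fileira
-- ===== SOURCE A (Python) =====
-- def encontrar_melhor_fileira(sala_cinema, tamanho_grupo):
--     """
--     Encontra a melhor fileira de cinema para um grupo se sentar junto.
--
--     A função analisa todas as fileiras da sala e retorna o número da fileira que:
--     - Tem pelo menos 'tamanho_grupo' assentos consecutivos livres
--     - Entre as fileiras que atendem ao critério acima, escolhe a que tem mais assentos consecutivos livres
--     - Em caso de empate, escolhe a fileira mais ao fundo (maior índice)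
--
--     Args:
--         sala_cinema (list): Lista de listas de booleanos representando a sala de cinema.
--                            Cada lista interna representa uma fileira, onde True = ocupado, False = livre.
--                            A primeira fileira tem índice 0.
--         tamanho_grupo (int): Número de pessoas no grupo que precisam se sentar juntos.
--
--     Returns:
--         int: Número da fileira escolhida (0-indexed), ou -1 se nenhuma fileira couber o grupo.
--
--     Examples:
--         >>> sala = [[False, False, True, False, False],  # Fileira 0: 2 assentos consecutivos
--         ...         [True, False, False, False, True],   # Fileira 1: 3 assentos consecutivos
--         ...         [False, False, False, False, False]] # Fileira 2: 5 assentos consecutivos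
--         >>> encontrar_melhor_fileira(sala, 3)
--         2
--         >>> encontrar_melhor_fileira(sala, 4)
--         2
--         >>> encontrar_melhor_fileira(sala, 6)
--         -1
--     """
--     if not sala_cinema or tamanho_grupo <= 0:
--         return -1
--
--     melhor_fileira = -1
--     max_consecutivos = 0
--
--     for i, fileira in enumerate(sala_cinema):
--         if not fileira:  # Fileira vazia
--             continue
--
--         # Encontrar a maior sequência de assentos consecutivos livres
--         max_atual = 0
--         contador_atual = 0
--
--         for assento in fileira:
--             if not assento:  # Assento livre
--                 contador_atual += 1
--             else:  # Assento ocupado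
--                 max_atual = max(max_atual, contador_atual)
--                 contador_atual = 0
--
--         # Verificar se há uma sequência no final da fileira
--         max_atual = max(max_atual, contador_atual)
--
--         # Verificar se esta fileira pode acomodar o grupo
--         if max_atual >= tamanho_grupo:
--             # Se tem mais assentos consecutivos que a melhor até agora, ou
--             # se tem a mesma quantidade mas é uma fileira mais ao fundo
--             if max_atual > max_consecutivos or (max_atual == max_consecutivos and i > melhor_fileira):
--                 melhor_fileira = i
--                 max_consecutivos = max_atual
--
--     return melhor_fileira
-- ===== SOURCE B (Python) =====
-- def maior_sequencia(fileira):
--     """Longest run of free (False) seats, by splitting off one maximal run at a time."""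
--     melhor = 0
--     resto = fileira
--     while resto:
--         if resto[0]:
--             resto = resto[1:]
--         else:
--             livres = 1
--             while livres < len(resto) and not resto[livres]:
--                 livres += 1
--             if livres > melhor:
--                 melhor = livres
--             resto = resto[livres:]
--     return melhor
--
--
-- def encontrar_melhor_fileira(sala_cinema, tamanho_grupo):
--     if not sala_cinema or tamanho_grupo <= 0:
--         return -1
--     maximos = [maior_sequencia(f) for f in sala_cinema]
--     melhor = -1
--     melhor_max = 0
--     for i, m in enumerate(maximos):
--         if m >= tamanho_grupo and m >= melhor_max:
--             melhor, melhor_max = i, m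
--     return melhor
-- ===== Notes on version B (the rewrite author's own statement) =====
-- stated objective: alternative
-- what changed: A's fused single pass (per-row running free-seat counter interleaved with best-row bookkeeping and a two-branch tie-break) is replaced by a two-phase decomposition: each row's longest free run is found by a run-splitting loop that strips off one maximal free run at a time (inner while = run length), producing a per-row maxima list, then a separate selection scan with a single >= comparison picks the last best row; the empty-row special case disappears; trades slice copies in the row scan for the plainer structure.
import Mathlib
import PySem

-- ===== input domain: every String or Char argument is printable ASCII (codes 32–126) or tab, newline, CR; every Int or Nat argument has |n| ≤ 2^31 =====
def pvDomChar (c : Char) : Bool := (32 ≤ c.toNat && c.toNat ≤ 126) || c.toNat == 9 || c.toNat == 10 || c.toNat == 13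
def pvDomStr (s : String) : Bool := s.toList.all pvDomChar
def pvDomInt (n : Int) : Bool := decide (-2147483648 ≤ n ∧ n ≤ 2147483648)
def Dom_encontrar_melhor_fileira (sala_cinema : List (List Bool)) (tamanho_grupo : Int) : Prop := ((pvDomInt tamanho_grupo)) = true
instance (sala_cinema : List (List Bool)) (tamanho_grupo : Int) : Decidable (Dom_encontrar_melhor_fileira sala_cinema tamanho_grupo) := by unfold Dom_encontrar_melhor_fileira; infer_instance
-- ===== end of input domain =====

-- B replaces A's fused counter loop by a two-phase decomposition (per-row longest free run
-- found by splitting off one maximal free run at a time, then a separate selection scan with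
-- a single ≥ comparison); objective: alternative. Equal return value on all inputs (A is total).

-- ===== PORT A =====
def encontrar_melhor_fileira (sala_cinema : List (List Bool)) (tamanho_grupo : Int) : Int :=
  if sala_cinema = [] ∨ tamanho_grupo ≤ 0 then -1
  else
    ((PySem.List.enumerate sala_cinema).foldl
      (fun (st : Int × Int) (p : Int × List Bool) =>
        if p.2 = [] then st
        else
          let q := p.2.foldl
            (fun (q : Int × Int) (assento : Bool) =>
              if !assento then (q.1, q.2 + 1) else (max q.1 q.2, 0)) ((0 : Int), (0 : Int))
          let maxAtual := max q.1 q.2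
          if maxAtual ≥ tamanho_grupo then
            if maxAtual > st.2 ∨ (maxAtual = st.2 ∧ p.1 > st.1) then (p.1, maxAtual) else st
          else st)
      ((-1 : Int), (0 : Int))).1

-- ===== PORT B =====
-- per-row longest free run: while-loop that strips a leading occupied seat, or splits off
-- the whole leading maximal free run (Python's inner counting while-loop = takeWhile length)
def maiorSeqAux : List Bool → Int → Int
  | [], melhor => melhor
  | true :: resto, melhor => maiorSeqAux resto melhor
  | false :: resto, melhor =>
      let livres : Int := ((1 + (resto.takeWhile (fun a => !a)).length : Nat) : Int)
      maiorSeqAux (resto.drop (resto.takeWhile (fun a => !a)).length)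
        (if livres > melhor then livres else melhor)
termination_by l _ => l.length
decreasing_by all_goals simp

def maior_sequencia (fileira : List Bool) : Int := maiorSeqAux fileira 0

def encontrar_melhor_fileira_alt (sala_cinema : List (List Bool)) (tamanho_grupo : Int) : Int :=
  if sala_cinema = [] ∨ tamanho_grupo ≤ 0 then -1
  else
    let maximos := sala_cinema.map maior_sequencia
    ((PySem.List.enumerate maximos).foldl
      (fun (st : Int × Int) (p : Int × Int) =>
        if p.2 ≥ tamanho_grupo ∧ p.2 ≥ st.2 then (p.1, p.2) else st)
      ((-1 : Int), (0 : Int))).1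

-- ===== PRECONDITION & SPEC =====
def Spec_encontrar_melhor_fileira (sala_cinema : List (List Bool)) (tamanho_grupo : Int) (out : Int) : Prop := out = encontrar_melhor_fileira_alt sala_cinema tamanho_grupo
instance (sala_cinema : List (List Bool)) (tamanho_grupo : Int) (out : Int) : Decidable (Spec_encontrar_melhor_fileira sala_cinema tamanho_grupo out) := by unfold Spec_encontrar_melhor_fileira; infer_instance

-- ===== CLAIM (what is proved, stated in full; the proofs are below) =====
def Claim_equal_encontrar_melhor_fileira : Prop := ∀ (sala_cinema : List (List Bool)) (tamanho_grupo : Int), Dom_encontrar_melhor_fileira sala_cinema tamanho_grupo → Spec_encontrar_melhor_fileira sala_cinema tamanho_grupo (encontrar_melhor_fileira sala_cinema tamanho_grupo)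

-- ===== LEMMAS AND PROOFS =====

-- recursive characterisation of the longest free run (proof-side only)
def msRec : List Bool → Int
  | [] => 0
  | true :: rest => msRec rest
  | false :: rest =>
      max ((1 + (rest.takeWhile (fun a => !a)).length : Nat) : Int)
        (msRec (rest.drop (rest.takeWhile (fun a => !a)).length))
termination_by l => l.length
decreasing_by all_goals simp

-- running free-run maximum with a pending run of length c
def msRun : Int → List Bool → Int
  | c, [] => c
  | c, false :: rest => msRun (c + 1) rest
  | c, true :: rest => max c (msRun 0 rest)

lemma ms_nonneg : ∀ l, 0 ≤ msRec l := by
  intro l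
  induction l using msRec.induct with
  | case1 => simp [msRec]
  | case2 rest ih => simpa [msRec] using ih
  | case3 rest ih =>
    rw [msRec]
    exact le_trans (by positivity) (le_max_left _ _)

lemma aux_eq : ∀ (l : List Bool) (melhor : Int), 0 ≤ melhor →
    maiorSeqAux l melhor = max melhor (msRec l) := by
  intro l
  induction l using msRec.induct with
  | case1 => intro melhor h; simp [maiorSeqAux, msRec]; omega
  | case2 rest ih =>
    intro melhor h
    rw [show maiorSeqAux (true :: rest) melhor = maiorSeqAux rest melhor from by rw [maiorSeqAux],
      ih melhor h]
    simp [msRec]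
  | case3 rest ih =>
    intro melhor h
    rw [maiorSeqAux, msRec]
    have hnn : (0 : Int) ≤ (if ((1 + (rest.takeWhile (fun a => !a)).length : Nat) : Int) > melhor
        then ((1 + (rest.takeWhile (fun a => !a)).length : Nat) : Int) else melhor) := by
      split <;> [positivity; exact h]
    rw [ih _ hnn]
    split <;> rename_i hcmp
    · exact (max_eq_right (le_trans (le_of_lt hcmp) (le_max_left _ _))).symm
    · conv_rhs => rw [← max_assoc, max_eq_left (not_lt.mp hcmp)]

lemma ms_eq (l : List Bool) : maior_sequencia l = msRec l := by
  rw [maior_sequencia, aux_eq l 0 le_rfl]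
  exact max_eq_right (ms_nonneg l)

lemma ms_split : ∀ l : List Bool,
    msRec l =
      max (((l.takeWhile (fun a => !a)).length : Int))
        (msRec (l.drop (l.takeWhile (fun a => !a)).length)) := by
  intro l
  match l with
  | [] => simp [msRec]
  | true :: rest =>
    simp
    exact ms_nonneg _
  | false :: rest =>
    rw [msRec]
    simp only [List.takeWhile_cons, Bool.not_false, if_pos, List.length_cons,
      List.drop_succ_cons, ite_true]
    rw [Nat.add_comm 1]

lemma msRun_eq : ∀ (l : List Bool) (c : Int), 0 ≤ c →
    msRun c l =
      max (c + ((l.takeWhile (fun a => !a)).length : Int))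
        (msRec (l.drop (l.takeWhile (fun a => !a)).length)) := by
  intro l
  induction l with
  | nil => intro c hc; simp [msRun, msRec]; omega
  | cons a rest ih =>
    intro c hc
    cases a
    · rw [show msRun c (false :: rest) = msRun (c + 1) rest from rfl, ih (c + 1) (by omega)]
      simp only [List.takeWhile_cons, Bool.not_false, ite_true, List.length_cons,
        List.drop_succ_cons]
      push_cast
      ring_nf
    · rw [show msRun c (true :: rest) = max c (msRun 0 rest) from rfl, ih 0 le_rfl]
      simp only [List.takeWhile_cons, Bool.not_true, ite_false, List.length_nil,
        Nat.cast_zero, add_zero, List.drop_zero, zero_add]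
      rw [← ms_split rest]
      simp [msRec]

lemma msRun_zero (l : List Bool) : msRun 0 l = msRec l := by
  rw [msRun_eq l 0 le_rfl, zero_add, ← ms_split l]

lemma inner_eq : ∀ (l : List Bool) (m c : Int),
    (max (l.foldl
        (fun (q : Int × Int) (assento : Bool) =>
          if !assento then (q.1, q.2 + 1) else (max q.1 q.2, 0)) (m, c)).1
      (l.foldl
        (fun (q : Int × Int) (assento : Bool) =>
          if !assento then (q.1, q.2 + 1) else (max q.1 q.2, 0)) (m, c)).2)
      = max m (msRun c l) := by
  intro l
  induction l with
  | nil => intro m c; simp [msRun]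
  | cons a rest ih =>
    intro m c
    cases a
    · simpa using ih m (c + 1)
    · simp only [List.foldl_cons, Bool.not_true, Bool.false_eq_true, if_false]
      rw [show msRun c (true :: rest) = max c (msRun 0 rest) from rfl, ← max_assoc]
      exact ih (max m c) 0

lemma outer_eq (g : Int) (hg : 1 ≤ g) : ∀ (ps : List (Int × List Bool)) (mel maxc : Int),
    ps.Pairwise (fun p q => p.1 < q.1) → (∀ p ∈ ps, mel < p.1) →
    (ps.foldl
      (fun (st : Int × Int) (p : Int × List Bool) =>
        if p.2 = [] then st
        else
          let q := p.2.foldl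
            (fun (q : Int × Int) (assento : Bool) =>
              if !assento then (q.1, q.2 + 1) else (max q.1 q.2, 0)) ((0 : Int), (0 : Int))
          let maxAtual := max q.1 q.2
          if maxAtual ≥ g then
            if maxAtual > st.2 ∨ (maxAtual = st.2 ∧ p.1 > st.1) then (p.1, maxAtual) else st
          else st)
      (mel, maxc)) =
    (ps.foldl
      (fun (st : Int × Int) (p : Int × List Bool) =>
        if msRec p.2 ≥ g ∧ msRec p.2 ≥ st.2 then (p.1, msRec p.2) else st)
      (mel, maxc)) := by
  intro ps
  induction ps with
  | nil => intro mel maxc _ _; rfl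
  | cons p ps ih =>
    intro mel maxc hpw hmel
    rw [List.pairwise_cons] at hpw
    obtain ⟨hlt, hpw'⟩ := hpw
    have hm : mel < p.1 := hmel p List.mem_cons_self
    have htail : ∀ q ∈ ps, mel < q.1 := fun q hq => hmel q (List.mem_cons_of_mem _ hq)
    simp only [List.foldl_cons]
    by_cases hemp : p.2 = []
    · rw [if_pos hemp]
      have h0 : msRec p.2 = 0 := by rw [hemp]; simp [msRec]
      rw [if_neg (by rw [h0]; rintro ⟨h1, _⟩; omega)]
      exact ih mel maxc hpw' htail
    · rw [if_neg hemp]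
      have hin : max ((p.2.foldl
          (fun (q : Int × Int) (assento : Bool) =>
            if !assento then (q.1, q.2 + 1) else (max q.1 q.2, 0)) ((0 : Int), (0 : Int))).1)
          ((p.2.foldl
          (fun (q : Int × Int) (assento : Bool) =>
            if !assento then (q.1, q.2 + 1) else (max q.1 q.2, 0)) ((0 : Int), (0 : Int))).2)
          = msRec p.2 := by
        rw [inner_eq p.2 0 0, msRun_zero]
        exact max_eq_right (ms_nonneg _)
      rw [hin]
      by_cases h1 : msRec p.2 ≥ g
      · by_cases h2 : msRec p.2 ≥ maxc
        · rw [if_pos h1, if_pos (h2.lt_or_eq.elim Or.inl (fun h => Or.inr ⟨h.symm, hm⟩)),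
            if_pos ⟨h1, h2⟩]
          exact ih p.1 (msRec p.2) hpw' hlt
        · rw [if_pos h1, if_neg (by rintro (h | ⟨h, _⟩) <;> omega),
            if_neg (by rintro ⟨_, h⟩; omega)]
          exact ih mel maxc hpw' htail
      · rw [if_neg h1, if_neg (by rintro ⟨h, _⟩; omega)]
        exact ih mel maxc hpw' htail

lemma enum_map (f : List Bool → Int) : ∀ (xs : List (List Bool)) (s : Int),
    PySem.List.enumerate (xs.map f) s = (PySem.List.enumerate xs s).map (fun p => (p.1, f p.2)) := by
  intro xs
  induction xs with
  | nil => intro s; simp [PySem.List.enumerate_nil]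
  | cons x xs ih => intro s; simp [PySem.List.enumerate_cons, ih]

-- ===== VERDICT (by name: the statement is the Claim_ definition above) =====
theorem encontrar_melhor_fileira_spec : Claim_equal_encontrar_melhor_fileira := by
  intro sala g _
  unfold Spec_encontrar_melhor_fileira encontrar_melhor_fileira encontrar_melhor_fileira_alt
  by_cases h : sala = [] ∨ g ≤ 0
  · rw [if_pos h, if_pos h]
  · rw [if_neg h, if_neg h]
    rw [not_or] at h
    obtain ⟨hne, hgt⟩ := h
    have hg : 1 ≤ g := by omega
    clear hne
    simp only [enum_map maior_sequencia sala 0, List.foldl_map, ms_eq]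
    have hmel : ∀ p ∈ PySem.List.enumerate sala 0, (-1 : Int) < p.1 := by
      intro p hp
      rw [PySem.List.mem_enumerate_iff] at hp
      obtain ⟨k, hk, rfl⟩ := hp
      simp
      omega
    rw [outer_eq g hg (PySem.List.enumerate sala 0) (-1) 0
      (PySem.List.pairwise_lt_enumerate sala 0) hmel]
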